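-- pv_equiv track=rewrite | github.com/karma9874/CTF-CryptoTool | Utils/base91.py | b91decode
-- ===== SOURCE A (Python) =====
-- BASE91_ALPHA = 'ABCDEFGHIJKLMNOPQRSTUVWXYZabcdefghijklmnopqrstuvwxyz0123456789!#$%&()*+,./:;<=>?@[]^_`{|}~"'
--
-- MASK1 = 2**13 - 1
--
-- MASK3 = 2**8 - 1
--
-- def b91decode(num):
--     decoded = ""
--     n = 0
--     b = 0
--     v = -1
--
--     for digit in num:
--         c = BASE91_ALPHA.index(digit)
--         if v < 0:
--             v = c
--         else:
--             v += c * 91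
--             b |= (v << n)
--             if (v & MASK1) > 88:
--                 n += 13
--             else:
--                 n += 14
--             while n > 7:
--                 decoded += chr(b & MASK3)
--                 b >>= 8
--                 n -= 8
--             v = -1
--     if v+1:
--         decoded += chr((b | v << n) & MASK3)
--     return decoded
-- ===== SOURCE B (Python) =====
-- BASE91_ALPHA = 'ABCDEFGHIJKLMNOPQRSTUVWXYZabcdefghijklmnopqrstuvwxyz0123456789!#$%&()*+,./:;<=>?@[]^_`{|}~"'
--
-- MASK1 = 2**13 - 1
--
-- MASK3 = 2**8 - 1
--
-- def b91decode(num):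
--     # Explicit pair iteration instead of A's v<0 sentinel state machine.
--     out = []
--     n = 0
--     b = 0
--     i = 0
--     L = len(num)
--     while i + 1 < L:
--         v = BASE91_ALPHA.index(num[i]) + BASE91_ALPHA.index(num[i + 1]) * 91
--         b |= v << n
--         n += 13 if (v & MASK1) > 88 else 14
--         while n > 7:
--             out.append(chr(b & MASK3))
--             b >>= 8
--             n -= 8
--         i += 2
--     if i < L:
--         out.append(chr((b | BASE91_ALPHA.index(num[i]) << n) & MASK3))
--     return "".join(out)
-- ===== Notes on version B (the rewrite author's own statement) =====
-- stated objective: alternative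
-- what changed: A drives a per-character state machine whose v<0 sentinel toggles between reading the low and the high base-91 digit; B walks the input two characters at a time with an explicit index, decoding each complete pair directly and handling a single trailing digit after the loop, so the sentinel and the per-character mode branch disappear.
import Mathlib
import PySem

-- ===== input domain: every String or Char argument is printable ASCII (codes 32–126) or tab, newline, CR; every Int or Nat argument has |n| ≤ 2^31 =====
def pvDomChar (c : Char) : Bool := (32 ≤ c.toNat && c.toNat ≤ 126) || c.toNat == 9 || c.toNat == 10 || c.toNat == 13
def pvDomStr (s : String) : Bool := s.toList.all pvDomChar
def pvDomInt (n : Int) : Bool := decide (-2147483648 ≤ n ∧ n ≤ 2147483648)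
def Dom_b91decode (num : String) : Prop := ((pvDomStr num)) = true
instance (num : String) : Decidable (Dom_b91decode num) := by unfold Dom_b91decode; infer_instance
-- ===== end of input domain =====

-- B replaces A's per-character sentinel (v<0) state machine by explicit iteration
-- over pairs of digits with a leftover case after the loop (objective: alternative decomposition).

def BASE91_ALPHA : List Char :=
  "ABCDEFGHIJKLMNOPQRSTUVWXYZabcdefghijklmnopqrstuvwxyz0123456789!#$%&()*+,./:;<=>?@[]^_`{|}~\"".toList

-- BASE91_ALPHA.index(c); under Pre_ the character is present, so getD 0 is never taken
-- (Python raises ValueError when absent; those inputs are excluded by Pre_).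
def b91idx (c : Char) : Nat := (PySem.List.index? BASE91_ALPHA c).getD 0

-- ===== PORT A =====
-- state: (decoded, n, b, v).  In Python n and b stay nonnegative throughout, so they are
-- ported as Nat; v keeps the -1 sentinel, so it is Int (v ≥ 0 whenever its bits are used,
-- so .toNat there is exact).
def b91AEmit (acc : List Char) (b n : Nat) : List Char × Nat × Nat :=
  if n > 7 then b91AEmit (acc ++ [Char.ofNat (b &&& 255)]) (b >>> 8) (n - 8)
  else (acc, b, n)
termination_by n
decreasing_by omega

def b91AStep (st : List Char × Nat × Nat × Int) (digit : Char) : List Char × Nat × Nat × Int :=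
  let (decoded, n, b, v) := st
  let c : Nat := b91idx digit
  if v < 0 then (decoded, n, b, (c : Int))
  else
    let v' : Int := v + (c : Int) * 91
    let b' := b ||| (v'.toNat <<< n)
    let n' := if (v'.toNat &&& 8191) > 88 then n + 13 else n + 14
    let (decoded', b'', n'') := b91AEmit decoded b' n'
    (decoded', n'', b'', (-1 : Int))

def b91decode (num : String) : String :=
  let (decoded, n, b, v) := num.toList.foldl b91AStep ([], 0, 0, (-1 : Int))
  if v + 1 ≠ 0 then String.mk (decoded ++ [Char.ofNat ((b ||| (v.toNat <<< n)) &&& 255)])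
  else String.mk decoded

-- ===== PORT B =====
def b91BEmit (acc : List Char) (b n : Nat) : List Char × Nat × Nat :=
  if n > 7 then b91BEmit (acc ++ [Char.ofNat (b &&& 255)]) (b >>> 8) (n - 8)
  else (acc, b, n)
termination_by n
decreasing_by omega

def b91BGo (acc : List Char) (l : List Char) (n b : Nat) : List Char :=
  match l with
  | d1 :: d2 :: rest =>
    let v := b91idx d1 + b91idx d2 * 91
    let b' := b ||| (v <<< n)
    let n' := if (v &&& 8191) > 88 then n + 13 else n + 14
    let (acc', b'', n'') := b91BEmit acc b' n'
    b91BGo acc' rest n'' b''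
  | [d] => acc ++ [Char.ofNat ((b ||| (b91idx d <<< n)) &&& 255)]
  | [] => acc

def b91decode_alt (num : String) : String :=
  String.mk (b91BGo [] num.toList 0 0)

-- ===== PRECONDITION & SPEC =====
-- Pre_ excludes exactly the inputs containing a character outside the base91 alphabet,
-- on which Python A (and B) raises ValueError via .index.
def Pre_b91decode (num : String) : Prop :=
  num.toList.all (fun c => BASE91_ALPHA.contains c) = true
instance (num : String) : Decidable (Pre_b91decode num) := by unfold Pre_b91decode; infer_instance

def pvWitness_b91decode : String := "AB"

def Spec_b91decode (num : String) (out : String) : Prop := out = b91decode_alt num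
instance (num : String) (out : String) : Decidable (Spec_b91decode num out) := by unfold Spec_b91decode; infer_instance

-- ===== CLAIM (what is proved, stated in full; the proofs are below) =====
def Claim_equal_b91decode : Prop := ∀ (num : String), Dom_b91decode num → Pre_b91decode num → Spec_b91decode num (b91decode num)

-- ===== LEMMAS AND PROOFS =====

lemma emit_eq (n : Nat) : ∀ (acc : List Char) (b : Nat), b91AEmit acc b n = b91BEmit acc b n := by
  induction n using Nat.strong_induction_on with
  | _ n ih =>
    intro acc b
    rw [b91AEmit, b91BEmit]
    split
    · exact ih (n - 8) (by omega) _ _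
    · rfl

-- A's final flush of the state machine
def b91AFin (st : List Char × Nat × Nat × Int) : List Char :=
  let (decoded, n, b, v) := st
  if v + 1 ≠ 0 then decoded ++ [Char.ofNat ((b ||| (v.toNat <<< n)) &&& 255)]
  else decoded

lemma go_eq : ∀ (k : Nat) (l : List Char), l.length ≤ k → ∀ (acc : List Char) (n b : Nat),
    b91AFin (l.foldl b91AStep (acc, n, b, (-1 : Int))) = b91BGo acc l n b := by
  intro k
  induction k with
  | zero =>
    intro l hl acc n b
    have : l = [] := List.length_eq_zero_iff.mp (Nat.le_zero.mp hl)
    subst this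
    simp [b91AFin, b91BGo]
  | succ k ih =>
    intro l hl acc n b
    match l with
    | [] => simp [b91AFin, b91BGo]
    | [d] =>
      simp only [List.foldl, b91AStep, b91AFin, b91BGo]
      have : ¬ ((b91idx d : Int) + 1 = 0) := by omega
      simp [this]
    | d1 :: d2 :: rest =>
      simp only [List.foldl]
      have h1 : b91AStep (acc, n, b, (-1 : Int)) d1 = (acc, n, b, (b91idx d1 : Int)) := by
        simp [b91AStep]
      rw [h1]
      have hv : ¬ ((b91idx d1 : Int) < 0) := by omega
      have hnat : ((b91idx d1 : Int) + (b91idx d2 : Int) * 91).toNat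
          = b91idx d1 + b91idx d2 * 91 := by omega
      have h2 : b91AStep (acc, n, b, (b91idx d1 : Int)) d2 =
          (let v := b91idx d1 + b91idx d2 * 91
           let b' := b ||| (v <<< n)
           let n' := if (v &&& 8191) > 88 then n + 13 else n + 14
           let (acc', b'', n'') := b91BEmit acc b' n'
           (acc', n'', b'', (-1 : Int))) := by
        simp only [b91AStep, hv, if_false, hnat, emit_eq]
      rw [h2]
      simp only [b91BGo]
      obtain ⟨acc', b'', n''⟩ := b91BEmit acc (b ||| ((b91idx d1 + b91idx d2 * 91) <<< n))
        (if ((b91idx d1 + b91idx d2 * 91) &&& 8191) > 88 then n + 13 else n + 14)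
      exact ih rest (by simp at hl ⊢; omega) acc' n'' b''

-- ===== VERDICT (by name: the statement is the Claim_ definition above) =====
theorem b91decode_spec : Claim_equal_b91decode := by
  intro num _ _
  unfold Spec_b91decode b91decode b91decode_alt
  rw [← go_eq num.toList.length num.toList le_rfl [] 0 0]
  unfold b91AFin
  obtain ⟨decoded, n, b, v⟩ := num.toList.foldl b91AStep ([], 0, 0, (-1 : Int))
  by_cases h : v + 1 = 0 <;> simp [h]
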